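-- pv_equiv track=rewrite | github.com/he2joo/algorithms-study | programmers/Hyun/week5/doll_drawing.py | solution
-- ===== SOURCE A (Python) =====
-- def solution(board, moves):
--     moves = [i - 1 for i in moves]
--     bucket = []
--
--     line = []
--
--     for x in range(len(board[0])):
--         tmp = []
--         for y in range(len(board)):
--             if board[y][x] == 0:
--                 continue
--             else:
--                 tmp.append(board[y][x])
--         line.append(tmp[::-1])
--
--     ans = 0
--
--     for move in moves:
--         if line[move]:
--             bucket.append(line[move].pop())
--         if len(bucket) >= 2 and bucket[-1] == bucket[-2]:
--             ans += 2
--             bucket.pop()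
--             bucket.pop()
--
--     return ans
-- ===== SOURCE B (Python) =====
-- def solution(board, moves):
--     n = len(board)
--     top = [0] * len(board[0])
--     bucket = []
--     ans = 0
--     for move in moves:
--         m = move - 1
--         t = top[m]
--         while t < n and board[t][m] == 0:
--             t += 1
--         if t < n:
--             doll = board[t][m]
--             if bucket and bucket[-1] == doll:
--                 bucket.pop()
--                 ans += 2
--             else:
--                 bucket.append(doll)
--             top[m] = t + 1
--         else:
--             top[m] = t
--     return ans
-- ===== Notes on version B (the rewrite author's own statement) =====
-- stated objective: alternative
-- what changed: B drops A's full-board preprocessing into reversed column stacks and instead scans the board lazily with a per-column top-row pointer array, and replaces A's append-then-pop-pair bucket step with a direct compare-top-before-push step.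
-- outside the precondition, e.g. on solution([[0, 2], [2, 2, 9]], [0, 0]): A returns 2, B returns 0
import Mathlib
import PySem

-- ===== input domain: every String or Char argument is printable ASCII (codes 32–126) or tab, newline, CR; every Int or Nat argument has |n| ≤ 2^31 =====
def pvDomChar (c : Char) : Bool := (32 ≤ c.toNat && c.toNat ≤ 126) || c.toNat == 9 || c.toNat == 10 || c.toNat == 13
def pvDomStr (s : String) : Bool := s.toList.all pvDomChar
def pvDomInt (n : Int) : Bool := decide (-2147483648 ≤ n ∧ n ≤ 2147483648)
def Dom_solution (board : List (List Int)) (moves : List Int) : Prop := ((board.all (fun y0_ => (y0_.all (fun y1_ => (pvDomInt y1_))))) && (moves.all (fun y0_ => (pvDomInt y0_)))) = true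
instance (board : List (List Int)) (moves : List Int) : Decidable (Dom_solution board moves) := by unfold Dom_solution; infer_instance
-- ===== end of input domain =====

-- B replaces A's eager preprocessing of the whole board into reversed column stacks by a lazy
-- per-column top-row pointer and a compare-top-before-push bucket step (objective: alternative).

-- ===== PORT A =====
def solution (board : List (List Int)) (moves : List Int) : Int :=
  let moves' := moves.map (fun i => i - 1)
  -- w = len(board[0]); board[0] raises IndexError on an empty board, excluded by Pre_
  let w : Int := (((PySem.List.pyGet? board 0).getD []).length : Int)
  -- line: for x in range(w): tmp = the nonzero board[y][x] top-to-bottom; line.append(tmp[::-1])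
  -- (board[y][x] is in range under Pre_, so the defaulted read pyGetD is exact here)
  let line : List (List Int) :=
    (PySem.List.pyRange 0 w 1).map (fun x =>
      (board.foldl (fun tmp row =>
          if PySem.List.pyGetD row x 0 = 0 then tmp
          else tmp ++ [PySem.List.pyGetD row x 0]) []).reverse)
  let fin := moves'.foldl (fun (st : List (List Int) × List Int × Int) move =>
      let cur := PySem.List.pyGetD st.1 move []   -- line[move]; in range under Pre_
      -- if line[move]: bucket.append(line[move].pop())
      let p : List (List Int) × List Int :=
        if cur ≠ [] then
          (PySem.List.pySetD st.1 move cur.dropLast, st.2.1 ++ [cur.getLastD 0])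
        else (st.1, st.2.1)
      -- bucket[-1], bucket[-2] are in range under the length guard, so getLastD is exact here
      if 2 ≤ p.2.length ∧ p.2.getLastD 0 = p.2.dropLast.getLastD 0 then
        (p.1, p.2.dropLast.dropLast, st.2.2 + 2)
      else (p.1, p.2, st.2.2))
    (line, [], 0)
  fin.2.2

-- ===== PORT B =====
-- while t < n and board[t][m] == 0: t += 1   (fuel n+1 always suffices; reads are in range under Pre_)
def bAdv (board : List (List Int)) (m : Int) : Nat → Int → Int
  | 0, t => t
  | fuel+1, t =>
      if t < (board.length : Int) ∧ PySem.List.pyGetD (PySem.List.pyGetD board t []) m 0 = 0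
      then bAdv board m fuel (t + 1) else t

def solution_alt (board : List (List Int)) (moves : List Int) : Int :=
  let n : Int := (board.length : Int)
  let w : Nat := ((PySem.List.pyGet? board 0).getD []).length
  let fin := moves.foldl (fun (st : List Int × List Int × Int) move =>
      let m := move - 1
      let t := bAdv board m (board.length + 1) (PySem.List.pyGetD st.1 m 0)
      if t < n then
        let doll := PySem.List.pyGetD (PySem.List.pyGetD board t []) m 0
        let q : List Int × Int :=
          if st.2.1 ≠ [] ∧ st.2.1.getLastD 0 = doll then (st.2.1.dropLast, st.2.2 + 2)
          else (st.2.1 ++ [doll], st.2.2)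
        (PySem.List.pySetD st.1 m (t + 1), q.1, q.2)
      else (PySem.List.pySetD st.1 m t, st.2.1, st.2.2))
    (List.replicate w 0, [], 0)
  fin.2.2

-- ===== PRECONDITION & SPEC =====
-- Pre_ is the puzzle's natural domain plus Python's in-range negative wraparound: a nonempty board,
-- no row shorter than row 0, and each move either in 1..width or, on an exactly rectangular board,
-- a non-positive wraparound index down to 1-width.  Outside it A raises IndexError, except for
-- non-positive moves on boards with rows longer than row 0, where A's (and B's) negative-index
-- wraparound behaviours are implementation accidents that read different cells.
def Pre_solution (board : List (List Int)) (moves : List Int) : Prop :=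
  board ≠ [] ∧ (∀ row ∈ board, (board.headD []).length ≤ row.length) ∧
    ∀ m ∈ moves, (1 ≤ m ∧ m ≤ ((board.headD []).length : Int)) ∨
      (1 - ((board.headD []).length : Int) ≤ m ∧ m ≤ 0 ∧
        ∀ row ∈ board, row.length = (board.headD []).length)
instance (board : List (List Int)) (moves : List Int) : Decidable (Pre_solution board moves) := by
  unfold Pre_solution; infer_instance

def pvWitness_solution : List (List Int) × List Int :=
  ([[0, 1, 2], [1, 2, 2], [1, 1, 0]], [1, 2, 3, 0, -1, 3, 2, 3, 1])

def Spec_solution (board : List (List Int)) (moves : List Int) (out : Int) : Prop := out = solution_alt board moves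
instance (board : List (List Int)) (moves : List Int) (out : Int) : Decidable (Spec_solution board moves out) := by unfold Spec_solution; infer_instance

-- ===== CLAIM (what is proved, stated in full; the proofs are below) =====
def Claim_equal_solution : Prop := ∀ (board : List (List Int)) (moves : List Int), Dom_solution board moves → Pre_solution board moves → Spec_solution board moves (solution board moves)

-- ===== LEMMAS AND PROOFS =====

-- column x of the board as A and B read it (defaulted reads; in range under Pre_)
def colL (board : List (List Int)) (x : Int) : List Int :=
  board.map (fun row => PySem.List.pyGetD row x 0)

def qNZ : Int → Bool := fun v => !(v == 0)

def wN (board : List (List Int)) : Nat := ((PySem.List.pyGet? board 0).getD []).length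

lemma length_colL (board : List (List Int)) (x : Int) : (colL board x).length = board.length := by
  simp [colL]

-- A's inner loop over the rows collects the nonzero entries of column x
lemma tmp_eq (board : List (List Int)) (x : Int) :
    board.foldl (fun tmp row =>
        if PySem.List.pyGetD row x 0 = 0 then tmp
        else tmp ++ [PySem.List.pyGetD row x 0]) []
      = (colL board x).filter qNZ := by
  have hfun : (fun (tmp : List Int) row =>
      if PySem.List.pyGetD row x 0 = 0 then tmp else tmp ++ [PySem.List.pyGetD row x 0])
      = (fun (tmp : List Int) row => if (qNZ (PySem.List.pyGetD row x 0)) = true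
          then tmp ++ [PySem.List.pyGetD row x 0] else tmp) := by
    funext tmp row
    by_cases h0 : PySem.List.pyGetD row x 0 = 0 <;> simp [h0, qNZ]
  rw [hfun, PySem.List.foldl_append_if (fun row => qNZ (PySem.List.pyGetD row x 0))
      (fun row => PySem.List.pyGetD row x 0) board []]
  simp only [List.nil_append, colL, List.filter_map]
  rfl

-- the cell B reads at row t, column c
lemma cell_eq (board : List (List Int)) (c : Nat) (t : Nat) (h : t < board.length) :
    (colL board (c : Int))[t]? =
      some (PySem.List.pyGetD (PySem.List.pyGetD board ((t : Nat) : Int) []) (c : Int) 0) := by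
  rw [PySem.List.pyGetD_natCast]
  simp [colL, List.getElem?_eq_getElem h, List.getD_eq_getElem?_getD]

-- reading row t of the board (defaulted; in range)
lemma rowAt (board : List (List Int)) (t : Nat) (h : t < board.length) :
    PySem.List.pyGetD board ((t : Nat) : Int) [] = board[t] := by
  rw [PySem.List.pyGetD_natCast, List.getD_eq_getElem?_getD, List.getElem?_eq_getElem h]
  rfl

-- Python's list[m] = v for an in-range negative index (no PySem book lemma covers pySetD here)
lemma pySetD_neg_natCast {a : Type} (xs : List a) (k : Nat) (v : a) (h0 : 0 < k)
    (h : k ≤ xs.length) : PySem.List.pySetD xs (-(k : Int)) v = xs.set (xs.length - k) v := by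
  simp only [PySem.List.pySetD, PySem.List.pySet?, PySem.List.pyIdx?]
  rw [if_neg (by omega), if_pos (by omega)]
  simp

-- a Python index m that denotes position c (directly or by wraparound)
lemma idx_getD {a : Type} (xs : List a) (d : a) (m : Int) (c : Nat) (hc : c < xs.length)
    (h : m = (c : Int) ∨ m = (c : Int) - (xs.length : Int)) :
    PySem.List.pyGetD xs m d = xs.getD c d := by
  rcases h with h | h
  · rw [h, PySem.List.pyGetD_natCast]
  · have hm2 : m = -((xs.length - c : Nat) : Int) := by omega
    rw [hm2, PySem.List.pyGetD_neg_natCast xs (xs.length - c) d (by omega) (by omega)]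
    have he : xs.length - (xs.length - c) = c := by omega
    simp only [he]
    simp [List.getD_eq_getElem?_getD, List.getElem?_eq_getElem hc]

lemma idx_setD {a : Type} (xs : List a) (v : a) (m : Int) (c : Nat) (hc : c < xs.length)
    (h : m = (c : Int) ∨ m = (c : Int) - (xs.length : Int)) :
    PySem.List.pySetD xs m v = xs.set c v := by
  rcases h with h | h
  · rw [h, PySem.List.pySetD_natCast]
  · have hm2 : m = -((xs.length - c : Nat) : Int) := by omega
    rw [hm2, pySetD_neg_natCast xs (xs.length - c) v (by omega) (by omega)]
    congr 1
    omega

-- characterisation of B's while loop (bAdv): it lands on the first nonzero cell at or below t,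
-- skipping only zeros (so the filtered column suffix is unchanged)
lemma bAdv_spec (board : List (List Int)) (m : Int) (c : Nat)
    (hread : ∀ row ∈ board, PySem.List.pyGetD row m 0 = PySem.List.pyGetD row ((c : Nat) : Int) 0) :
    ∀ (fuel t : Nat), board.length < fuel + t → t ≤ board.length →
    ∃ t' : Nat, bAdv board m fuel ((t : Nat) : Int) = ((t' : Nat) : Int) ∧ t ≤ t' ∧
      t' ≤ board.length ∧
      ((colL board (c : Int)).drop t).filter qNZ = ((colL board (c : Int)).drop t').filter qNZ ∧
      (t' < board.length →
        PySem.List.pyGetD (PySem.List.pyGetD board ((t' : Nat) : Int) []) m 0 ≠ 0) := by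
  intro fuel
  induction fuel with
  | zero => intro t h ht; omega
  | succ fuel ih =>
    intro t hfuel ht
    by_cases hn : t < board.length
    · have hcellc : PySem.List.pyGetD (PySem.List.pyGetD board ((t : Nat) : Int) []) m 0
          = PySem.List.pyGetD (PySem.List.pyGetD board ((t : Nat) : Int) []) ((c : Nat) : Int) 0 := by
        rw [rowAt board t hn]
        exact hread board[t] (List.getElem_mem hn)
      by_cases hz : PySem.List.pyGetD (PySem.List.pyGetD board ((t : Nat) : Int) []) m 0 = 0
      · have hstep : bAdv board m (fuel + 1) ((t : Nat) : Int)
            = bAdv board m fuel ((t + 1 : Nat) : Int) := by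
          have hlt : ((t : Nat) : Int) < ((board.length : Nat) : Int) := by exact_mod_cast hn
          simp only [bAdv]
          rw [if_pos ⟨hlt, hz⟩]
          norm_cast
        obtain ⟨t', h1, h2, h3, h4, h5⟩ := ih (t + 1) (by omega) (by omega)
        refine ⟨t', by rw [hstep, h1], by omega, h3, ?_, h5⟩
        rw [← h4]
        have hcl : t < (colL board (c : Int)).length := by rw [length_colL]; exact hn
        rw [List.drop_eq_getElem_cons hcl]
        have hz' : (colL board (c : Int))[t] = 0 := by
          have hc := cell_eq board c t hn
          rw [List.getElem?_eq_getElem hcl] at hc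
          rw [Option.some_inj.mp hc, ← hcellc]
          exact hz
        simp [hz', qNZ]
      · refine ⟨t, ?_, le_refl t, le_of_lt hn, rfl, fun _ => hz⟩
        simp only [bAdv]
        rw [if_neg (by exact fun hh => hz hh.2)]
    · refine ⟨t, ?_, le_refl t, ht, rfl, fun h => absurd h hn⟩
      have hge : ¬ ((t : Nat) : Int) < ((board.length : Nat) : Int) := by exact_mod_cast hn
      simp only [bAdv]
      rw [if_neg (by exact fun hh => hge hh.1)]

-- A's bucket-pair condition after an append, versus B's compare-before-push condition
lemma pair_cond (b : List Int) (d : Int) :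
    (2 ≤ (b ++ [d]).length ∧ (b ++ [d]).getLastD 0 = (b ++ [d]).dropLast.getLastD 0)
      ↔ (b ≠ [] ∧ b.getLastD 0 = d) := by
  have hlast : (b ++ [d]).getLastD 0 = d := by
    simp [List.getLastD_eq_getLast?]
  have hdl : (b ++ [d]).dropLast = b := List.dropLast_concat
  rw [hlast, hdl]
  constructor
  · rintro ⟨h1, h2⟩
    refine ⟨?_, h2.symm⟩
    intro hnil
    subst hnil
    simp at h1
  · rintro ⟨h1, h2⟩
    have : 0 < b.length := List.length_pos_of_ne_nil h1
    exact ⟨by simp; omega, h2.symm⟩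

lemma chain_append (b : List Int) (d : Int) (hch : List.IsChain (· ≠ ·) b)
    (h : ¬(b ≠ [] ∧ b.getLastD 0 = d)) : List.IsChain (· ≠ ·) (b ++ [d]) := by
  rw [List.isChain_append]
  refine ⟨hch, by simp, ?_⟩
  intro x hx y hy
  simp at hy
  subst hy
  rcases b with _ | ⟨a, bs⟩
  · simp at hx
  · push Not at h
    have hne := h (by simp)
    intro hxy
    apply hne
    rw [List.getLastD_eq_getLast?, hx]
    simpa using hxy

-- A's bucket never ends in an equal adjacent pair, so A's check fires only right after an append
lemma chain_no_pair (b : List Int) (h : List.IsChain (· ≠ ·) b) :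
    ¬(2 ≤ b.length ∧ b.getLastD 0 = b.dropLast.getLastD 0) := by
  rintro ⟨hlen, heq⟩
  rcases hrev : b.reverse with _ | ⟨y, rest⟩
  · have hb : b = [] := by simpa using congrArg List.reverse hrev
    subst hb; simp at hlen
  rcases rest with _ | ⟨x, rest'⟩
  · have hb : b = [y] := by simpa using congrArg List.reverse hrev
    subst hb; simp at hlen
  · have hb : b = rest'.reverse ++ [x, y] := by
      have := congrArg List.reverse hrev
      simpa using this
    subst hb
    have hxy : x ≠ y := by
      rw [List.isChain_append] at h
      simpa using h.2.1
    apply hxy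
    have h1 : (rest'.reverse ++ [x, y]).getLastD 0 = y := by
      simp [List.getLastD_eq_getLast?]
    have h2 : (rest'.reverse ++ [x, y]).dropLast.getLastD 0 = x := by
      have hd : (rest'.reverse ++ [x, y]).dropLast = rest'.reverse ++ [x] := by
        have he : rest'.reverse ++ [x, y] = (rest'.reverse ++ [x]) ++ [y] := by simp
        rw [he, List.dropLast_concat]
      rw [hd]
      simp [List.getLastD_eq_getLast?]
    rw [h1, h2] at heq
    exact heq.symm

-- the loop invariant: buckets and answers agree, A's bucket is pair-free, and per column c
-- A's remaining stack is the reversed nonzero filter of the column suffix below B's pointer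
def LoopRel (board : List (List Int))
    (sA : List (List Int) × List Int × Int) (sB : List Int × List Int × Int) : Prop :=
  sA.2.1 = sB.2.1 ∧ sA.2.2 = sB.2.2 ∧ List.IsChain (· ≠ ·) sA.2.1 ∧
  sA.1.length = wN board ∧ sB.1.length = wN board ∧
  ∀ c : Nat, c < wN board →
    ∃ t : Nat, sB.1[c]? = some ((t : Nat) : Int) ∧ t ≤ board.length ∧
      sA.1[c]? = some ((((colL board (c : Int)).drop t).filter qNZ).reverse)

-- named forms of the two loop bodies (definitionally the ports' loop bodies)
def stepA (st : List (List Int) × List Int × Int) (move : Int) :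
    List (List Int) × List Int × Int :=
  let cur := PySem.List.pyGetD st.1 move []
  let p : List (List Int) × List Int :=
    if cur ≠ [] then (PySem.List.pySetD st.1 move cur.dropLast, st.2.1 ++ [cur.getLastD 0])
    else (st.1, st.2.1)
  if 2 ≤ p.2.length ∧ p.2.getLastD 0 = p.2.dropLast.getLastD 0 then
    (p.1, p.2.dropLast.dropLast, st.2.2 + 2)
  else (p.1, p.2, st.2.2)

def stepB (board : List (List Int)) (st : List Int × List Int × Int) (move : Int) :
    List Int × List Int × Int :=
  let m := move - 1
  let t := bAdv board m (board.length + 1) (PySem.List.pyGetD st.1 m 0)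
  if t < (board.length : Int) then
    let doll := PySem.List.pyGetD (PySem.List.pyGetD board t []) m 0
    let q : List Int × Int :=
      if st.2.1 ≠ [] ∧ st.2.1.getLastD 0 = doll then (st.2.1.dropLast, st.2.2 + 2)
      else (st.2.1 ++ [doll], st.2.2)
    (PySem.List.pySetD st.1 m (t + 1), q.1, q.2)
  else (PySem.List.pySetD st.1 m t, st.2.1, st.2.2)

def lineInit (board : List (List Int)) : List (List Int) :=
  (PySem.List.pyRange 0 ((wN board : Nat) : Int) 1).map (fun x =>
    (board.foldl (fun tmp row =>
        if PySem.List.pyGetD row x 0 = 0 then tmp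
        else tmp ++ [PySem.List.pyGetD row x 0]) []).reverse)

lemma solution_eq (board : List (List Int)) (moves : List Int) :
    solution board moves
      = (List.foldl stepA (lineInit board, [], 0) (moves.map (fun i => i - 1))).2.2 := rfl

lemma solution_alt_eq (board : List (List Int)) (moves : List Int) :
    solution_alt board moves
      = (List.foldl (stepB board) (List.replicate (wN board) 0, [], 0) moves).2.2 := rfl

-- one move preserves the invariant
lemma step_rel (board : List (List Int)) (mv : Int)
    (hmv : (1 ≤ mv ∧ mv ≤ (wN board : Int)) ∨
      (1 - (wN board : Int) ≤ mv ∧ mv ≤ 0 ∧ ∀ row ∈ board, row.length = wN board))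
    (sA : List (List Int) × List Int × Int) (sB : List Int × List Int × Int)
    (h : LoopRel board sA sB) : LoopRel board (stepA sA (mv - 1)) (stepB board sB mv) := by
  obtain ⟨hbk, hans, hch, hlenA, hlenB, hcol⟩ := h
  obtain ⟨c, hcw, hcm1, hcm2⟩ : ∃ c : Nat, c < wN board ∧
      (mv - 1 = ((c : Nat) : Int) ∨ mv - 1 = ((c : Nat) : Int) - ((wN board : Nat) : Int)) ∧
      (mv - 1 = ((c : Nat) : Int) ∨ ∀ row ∈ board, row.length = wN board) := by
    rcases hmv with ⟨ha, hb⟩ | ⟨ha, hb, hr⟩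
    · exact ⟨(mv - 1).toNat, by omega, Or.inl (by omega), Or.inl (by omega)⟩
    · exact ⟨(mv - 1 + wN board).toNat, by omega, Or.inr (by omega), Or.inr hr⟩
  have hidxA : mv - 1 = ((c : Nat) : Int) ∨ mv - 1 = ((c : Nat) : Int) - ((sA.1.length : Nat) : Int) := by
    rw [hlenA]; exact hcm1
  have hidxB : mv - 1 = ((c : Nat) : Int) ∨ mv - 1 = ((c : Nat) : Int) - ((sB.1.length : Nat) : Int) := by
    rw [hlenB]; exact hcm1
  have hread : ∀ row ∈ board,
      PySem.List.pyGetD row (mv - 1) 0 = PySem.List.pyGetD row ((c : Nat) : Int) 0 := by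
    rcases hcm2 with hpos | hrect
    · intro row _; rw [hpos]
    · intro row hr
      rw [idx_getD row 0 (mv - 1) c (by rw [hrect row hr]; exact hcw)
          (by rw [hrect row hr]; exact hcm1), PySem.List.pyGetD_natCast]
  obtain ⟨t, htB, htn, htA⟩ := hcol c hcw
  have ht0 : PySem.List.pyGetD sB.1 (mv - 1) 0 = ((t : Nat) : Int) := by
    rw [idx_getD sB.1 0 (mv - 1) c (by omega) hidxB, List.getD_eq_getElem?_getD, htB]; rfl
  obtain ⟨t', hAdv, htt', ht'n, hfilter, hcell⟩ :=
    bAdv_spec board (mv - 1) c hread (board.length + 1) t (by omega) htn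
  have hAdv' : bAdv board (mv - 1) (board.length + 1) (PySem.List.pyGetD sB.1 (mv - 1) 0)
      = ((t' : Nat) : Int) := by
    rw [ht0]; exact hAdv
  have hcur : PySem.List.pyGetD sA.1 (mv - 1) []
      = (((colL board ((c : Nat) : Int)).drop t').filter qNZ).reverse := by
    rw [idx_getD sA.1 [] (mv - 1) c (by omega) hidxA, List.getD_eq_getElem?_getD, htA,
      ← hfilter]; rfl
  simp only [stepA, stepB]
  rw [hAdv', hcur]
  by_cases hlt : t' < board.length
  · have hltI : ((t' : Nat) : Int) < ((board.length : Nat) : Int) := by exact_mod_cast hlt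
    rw [if_pos hltI]
    have hcl : t' < (colL board ((c : Nat) : Int)).length := by rw [length_colL]; exact hlt
    have hget : (colL board ((c : Nat) : Int))[t']
        = PySem.List.pyGetD (PySem.List.pyGetD board ((t' : Nat) : Int) []) (mv - 1) 0 := by
      have hc := cell_eq board c t' hlt
      rw [List.getElem?_eq_getElem hcl] at hc
      rw [Option.some_inj.mp hc, rowAt board t' hlt, ← hread board[t'] (List.getElem_mem hlt)]
    have hdnz : (colL board ((c : Nat) : Int))[t'] ≠ 0 := by
      rw [hget]; exact hcell hlt
    have hfil : ((colL board ((c : Nat) : Int)).drop t').filter qNZ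
        = (colL board ((c : Nat) : Int))[t']
            :: ((colL board ((c : Nat) : Int)).drop (t' + 1)).filter qNZ := by
      rw [List.drop_eq_getElem_cons hcl, List.filter_cons_of_pos (by simp [qNZ, hdnz])]
    rw [hfil]
    rw [if_pos (by simp : ((colL board ((c : Nat) : Int))[t']
        :: ((colL board ((c : Nat) : Int)).drop (t' + 1)).filter qNZ).reverse ≠ [])]
    have hlastc : ((colL board ((c : Nat) : Int))[t']
        :: ((colL board ((c : Nat) : Int)).drop (t' + 1)).filter qNZ).reverse.getLastD 0
        = (colL board ((c : Nat) : Int))[t'] := by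
      simp [List.getLastD_eq_getLast?, List.getLast?_reverse]
    have hdlc : ((colL board ((c : Nat) : Int))[t']
        :: ((colL board ((c : Nat) : Int)).drop (t' + 1)).filter qNZ).reverse.dropLast
        = (((colL board ((c : Nat) : Int)).drop (t' + 1)).filter qNZ).reverse := by
      rw [List.dropLast_reverse]; rfl
    rw [hlastc, hdlc, hbk, ← hget]
    have hpair := pair_cond sB.2.1 ((colL board ((c : Nat) : Int))[t'])
    by_cases hbc : sB.2.1 ≠ [] ∧ sB.2.1.getLastD 0 = (colL board ((c : Nat) : Int))[t']
    · rw [if_pos (hpair.mpr hbc), if_pos hbc]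
      dsimp only
      rw [List.dropLast_concat]
      refine ⟨rfl, by rw [hans], (hbk ▸ hch).dropLast, ?_, ?_, ?_⟩
      · simpa [PySem.List.length_pySetD] using hlenA
      · simpa [PySem.List.length_pySetD] using hlenB
      · intro c' hc'
        by_cases hcc : c' = c
        · subst hcc
          refine ⟨t' + 1, ?_, by omega, ?_⟩
          · rw [idx_setD sB.1 _ (mv - 1) c' (by omega) hidxB, List.getElem?_set_self (by omega)]
            push_cast; ring_nf
          · rw [idx_setD sA.1 _ (mv - 1) c' (by omega) hidxA, List.getElem?_set_self (by omega)]
        · obtain ⟨t2, hB2, hn2, hA2⟩ := hcol c' hc'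
          refine ⟨t2, ?_, hn2, ?_⟩
          · rw [idx_setD sB.1 _ (mv - 1) c (by omega) hidxB, List.getElem?_set_ne (by omega), hB2]
          · rw [idx_setD sA.1 _ (mv - 1) c (by omega) hidxA, List.getElem?_set_ne (by omega), hA2]
    · rw [if_neg (fun hcon => hbc (hpair.mp hcon)), if_neg hbc]
      dsimp only
      refine ⟨rfl, by rw [hans], ?_, ?_, ?_, ?_⟩
      · exact chain_append _ _ (hbk ▸ hch) hbc
      · simpa [PySem.List.length_pySetD] using hlenA
      · simpa [PySem.List.length_pySetD] using hlenB
      · intro c' hc'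
        by_cases hcc : c' = c
        · subst hcc
          refine ⟨t' + 1, ?_, by omega, ?_⟩
          · rw [idx_setD sB.1 _ (mv - 1) c' (by omega) hidxB, List.getElem?_set_self (by omega)]
            push_cast; ring_nf
          · rw [idx_setD sA.1 _ (mv - 1) c' (by omega) hidxA, List.getElem?_set_self (by omega)]
        · obtain ⟨t2, hB2, hn2, hA2⟩ := hcol c' hc'
          refine ⟨t2, ?_, hn2, ?_⟩
          · rw [idx_setD sB.1 _ (mv - 1) c (by omega) hidxB, List.getElem?_set_ne (by omega), hB2]
          · rw [idx_setD sA.1 _ (mv - 1) c (by omega) hidxA, List.getElem?_set_ne (by omega), hA2]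
  · have ht'eq : t' = board.length := by omega
    have hgeI : ¬ ((t' : Nat) : Int) < ((board.length : Nat) : Int) := by exact_mod_cast hlt
    rw [if_neg hgeI]
    have hdropnil : (colL board ((c : Nat) : Int)).drop t' = [] := by
      apply List.drop_eq_nil_of_le
      rw [length_colL]; omega
    rw [hdropnil]
    rw [if_neg (by simp : ¬ ((([] : List Int).filter qNZ).reverse ≠ []))]
    rw [if_neg (chain_no_pair sA.2.1 hch)]
    dsimp only
    refine ⟨hbk, hans, hch, hlenA, ?_, ?_⟩
    · simpa [PySem.List.length_pySetD] using hlenB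
    · intro c' hc'
      by_cases hcc : c' = c
      · subst hcc
        refine ⟨t', ?_, ht'n, ?_⟩
        · rw [idx_setD sB.1 _ (mv - 1) c' (by omega) hidxB, List.getElem?_set_self (by omega)]
        · rw [htA, hfilter, hdropnil]
      · obtain ⟨t2, hB2, hn2, hA2⟩ := hcol c' hc'
        refine ⟨t2, ?_, hn2, hA2⟩
        rw [idx_setD sB.1 _ (mv - 1) c (by omega) hidxB, List.getElem?_set_ne (by omega), hB2]

-- the invariant holds at the start of the loop
lemma init_rel (board : List (List Int)) :
    LoopRel board (lineInit board, [], 0) (List.replicate (wN board) 0, [], 0) := by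
  refine ⟨rfl, rfl, by simp, ?_, by simp, ?_⟩
  · simp [lineInit, PySem.List.length_pyRange_one]
  · intro c hc
    refine ⟨0, ?_, by omega, ?_⟩
    · simp [hc]
    · simp only [lineInit, List.getElem?_map, PySem.List.getElem?_pyRange_one]
      rw [if_pos (by simpa using hc)]
      simp [tmp_eq]

-- the invariant is preserved along the whole move list
lemma loop_rel (board : List (List Int)) :
    ∀ (ms : List Int) (sA : List (List Int) × List Int × Int) (sB : List Int × List Int × Int),
      (∀ mv ∈ ms, (1 ≤ mv ∧ mv ≤ (wN board : Int)) ∨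
        (1 - (wN board : Int) ≤ mv ∧ mv ≤ 0 ∧ ∀ row ∈ board, row.length = wN board)) →
      LoopRel board sA sB →
      LoopRel board (List.foldl stepA sA (ms.map (fun i => i - 1)))
        (List.foldl (stepB board) sB ms) := by
  intro ms
  induction ms with
  | nil => intro sA sB _ h; simpa using h
  | cons mv rest ih =>
    intro sA sB hms h
    simp only [List.map_cons, List.foldl_cons]
    exact ih _ _ (fun m hm => hms m (by simp [hm]))
      (step_rel board mv (hms mv (by simp)) sA sB h)

-- ===== VERDICT (by name: the statement is the Claim_ definition above) =====
theorem solution_spec : Claim_equal_solution := by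
  intro board moves _ hpre
  unfold Spec_solution
  obtain ⟨hb, hw, hmv⟩ := hpre
  rw [solution_eq, solution_alt_eq]
  have hwn : (board.headD []).length = wN board := by
    cases board with
    | nil => exact absurd rfl hb
    | cons r rs => simp [wN]
  exact (loop_rel board moves (lineInit board, [], 0) (List.replicate (wN board) 0, [], 0)
      (fun mv h => by have := hmv mv h; rw [hwn] at this; exact this) (init_rel board)).2.1
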